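-- pv_equiv track=rewrite | github.com/100th/Baekjoon-Algorithm | Tests/test9 Net/05.py | solution
-- ===== SOURCE A (Python) =====
-- def solution(stats):
--     group = [[stats[0]]]
--     for i in range(1, len(stats)):
--         flag_enter = False
--         for j in range(len(group)):
--             if stats[i] > max(group[j]): # 하나라도 작은게 있다면
--                 flag_enter = True       # 들어간다
--                 group[j].append(stats[i])   # 그 그룹으로
--                 break
--
--         if flag_enter == False:         # 전부 다 크면
--             group.append([stats[i]])    # 새로 만든다
--
--     return len(group)
-- ===== SOURCE B (Python) =====
-- def solution(stats):
--     # tops[j] = current maximum of group j; the list stays sorted descending,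
--     # so the first group whose max is < x is found by binary search.
--     tops = []
--     for x in stats:
--         lo, hi = 0, len(tops)
--         while lo < hi:
--             mid = (lo + hi) // 2
--             if tops[mid] < x:
--                 hi = mid
--             else:
--                 lo = mid + 1
--         if lo == len(tops):
--             tops.append(x)
--         else:
--             tops[lo] = x
--     return len(tops)
-- ===== Notes on version B (the rewrite author's own statement) =====
-- stated objective: faster
-- what changed: Instead of keeping the full groups and linearly scanning them with max() for each element, B keeps only each group's current maximum in a descending list and binary-searches for the first group whose max is below the new element.
import Mathlib
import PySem

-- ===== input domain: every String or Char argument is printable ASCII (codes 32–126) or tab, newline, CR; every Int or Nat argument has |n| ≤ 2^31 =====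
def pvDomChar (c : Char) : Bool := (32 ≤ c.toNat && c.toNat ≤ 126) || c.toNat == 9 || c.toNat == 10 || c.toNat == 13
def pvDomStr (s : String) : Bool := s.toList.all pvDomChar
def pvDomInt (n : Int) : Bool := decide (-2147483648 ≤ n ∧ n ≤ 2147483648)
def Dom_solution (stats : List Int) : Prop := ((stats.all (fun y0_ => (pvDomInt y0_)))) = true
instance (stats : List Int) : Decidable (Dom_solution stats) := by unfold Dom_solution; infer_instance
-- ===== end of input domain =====

-- B replaces A's quadratic scan over full groups (recomputing max each time) by a
-- descending list of group maxima searched by binary search (objective: faster, O(n log n)).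

-- ===== PORT A =====
-- max(g) for the nonempty lists A applies it to (PySem.List.max?, default never used)
def pymaxv (g : List Int) : Int := (PySem.List.max? g (fun y => y)).getD 0

-- the inner `for j in range(len(group))` loop with its flag/break:
-- first group whose max is < x receives x, otherwise a new group is appended
def insertA (x : Int) : List (List Int) → List (List Int)
  | [] => [[x]]
  | g :: gs => if x > pymaxv g then (g ++ [x]) :: gs else g :: insertA x gs

def solution (stats : List Int) : Int :=
  match stats with
  | [] => 0  -- indexing the first element raises IndexError in Python; excluded by Pre_solution
  | s0 :: rest => ((rest.foldl (fun gs x => insertA x gs) [[s0]]).length : Int)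

-- ===== PORT B =====
-- the `while lo < hi` binary search of Source B
def bsearchB (tops : List Int) (x : Int) (lo hi : Nat) : Nat :=
  if _h : lo < hi then
    let mid := (lo + hi) / 2
    if tops.getD mid 0 < x then bsearchB tops x lo mid
    else bsearchB tops x (mid + 1) hi
  else lo
termination_by hi - lo
decreasing_by all_goals omega

-- one iteration of Source B's for-loop body
def stepB (tops : List Int) (x : Int) : List Int :=
  let lo := bsearchB tops x 0 tops.length
  if lo = tops.length then tops ++ [x] else tops.set lo x

def solution_alt (stats : List Int) : Int :=
  ((stats.foldl stepB []).length : Int)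

-- ===== PRECONDITION & SPEC =====
-- A indexes the first element immediately, so it raises IndexError on the empty list.
def Pre_solution (stats : List Int) : Prop := stats ≠ []
instance (stats : List Int) : Decidable (Pre_solution stats) := by unfold Pre_solution; infer_instance
def pvWitness_solution : List Int := [3, 1, 2]

def Spec_solution (stats : List Int) (out : Int) : Prop := out = solution_alt stats
instance (stats : List Int) (out : Int) : Decidable (Spec_solution stats out) := by unfold Spec_solution; infer_instance

-- ===== CLAIM (what is proved, stated in full; the proofs are below) =====
def Claim_equal_solution : Prop := ∀ (stats : List Int), Dom_solution stats → Pre_solution stats → Spec_solution stats (solution stats)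

-- ===== LEMMAS AND PROOFS =====

-- abstraction of both programs' step: replace the first max < x by x, else append
def linStep (x : Int) : List Int → List Int
  | [] => [x]
  | m :: ms => if x > m then x :: ms else m :: linStep x ms

theorem pymaxv_cons (a : Int) (t : List Int) : pymaxv (a :: t) = t.foldl max a := by
  simp [pymaxv, PySem.List.max?_id_cons]

theorem pymaxv_append_single (g : List Int) (hg : g ≠ []) (x : Int) :
    pymaxv (g ++ [x]) = max (pymaxv g) x := by
  cases g with
  | nil => exact absurd rfl hg
  | cons a t => simp [pymaxv_cons, List.foldl_append]

theorem insertA_nonempty {x : Int} : ∀ {gs : List (List Int)},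
    (∀ g ∈ gs, g ≠ []) → ∀ g ∈ insertA x gs, g ≠ [] := by
  intro gs
  induction gs with
  | nil =>
    intro _ g hg
    simp [insertA] at hg
    simp [hg]
  | cons a t ih =>
    intro hall g hg
    simp only [insertA] at hg
    split at hg
    · rcases List.mem_cons.mp hg with h1 | h1
      · subst h1; simp
      · exact hall _ (List.mem_cons_of_mem _ h1)
    · rcases List.mem_cons.mp hg with h1 | h1
      · subst h1; exact hall _ (by simp)
      · exact ih (fun g' hg' => hall g' (List.mem_cons_of_mem _ hg')) g h1

theorem map_pymaxv_insertA (x : Int) (gs : List (List Int)) (h : ∀ g ∈ gs, g ≠ []) :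
    (insertA x gs).map pymaxv = linStep x (gs.map pymaxv) := by
  induction gs with
  | nil => simp [insertA, linStep, pymaxv_cons]
  | cons g t ih =>
    simp only [insertA, List.map_cons, linStep]
    by_cases hx : x > pymaxv g
    · simp only [if_pos hx, List.map_cons]
      rw [pymaxv_append_single g (h g (by simp)) x]
      have : max (pymaxv g) x = x := max_eq_right (le_of_lt hx)
      rw [this]
    · simp only [if_neg hx, List.map_cons]
      rw [ih (fun g' hg' => h g' (List.mem_cons_of_mem _ hg'))]

theorem foldA_maxes (rest : List Int) :
    ∀ gs : List (List Int), (∀ g ∈ gs, g ≠ []) →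
    (rest.foldl (fun a x => insertA x a) gs).map pymaxv
      = rest.foldl (fun ms x => linStep x ms) (gs.map pymaxv) := by
  induction rest with
  | nil => intro gs _; rfl
  | cons x t ih =>
    intro gs hgs
    simp only [List.foldl_cons]
    rw [ih _ (insertA_nonempty hgs), map_pymaxv_insertA x gs hgs]

-- ---- B side: binary search finds the first index with tops[i] < x ----

theorem findIdx_le_of_pred {l : List Int} {p : Int → Bool} {i : Nat}
    (hi : i < l.length) (hp : p l[i] = true) : l.findIdx p ≤ i := by
  by_contra h
  have h2 : p l[i] = false := List.not_of_lt_findIdx (Nat.lt_of_not_le h)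
  simp [hp] at h2

theorem bsearchB_eq_findIdx (tops : List Int) (x : Int)
    (hmono : ∀ i j : Nat, i ≤ j → j < tops.length →
      tops.getD i 0 < x → tops.getD j 0 < x) :
    ∀ (n lo hi : Nat), hi - lo ≤ n → lo ≤ tops.findIdx (fun m => decide (m < x)) →
      tops.findIdx (fun m => decide (m < x)) ≤ hi → hi ≤ tops.length →
      bsearchB tops x lo hi = tops.findIdx (fun m => decide (m < x)) := by
  intro n
  induction n with
  | zero =>
    intro lo hi hn hlot hthi hhil
    rw [bsearchB]
    rw [dif_neg (by omega)]
    omega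
  | succ n ih =>
    intro lo hi hn hlot hthi hhil
    by_cases h : lo < hi
    · rw [bsearchB]
      rw [dif_pos h]
      have hmidhi : (lo + hi) / 2 < hi := by omega
      have hmidlen : (lo + hi) / 2 < tops.length := lt_of_lt_of_le hmidhi hhil
      by_cases hc : tops.getD ((lo + hi) / 2) 0 < x
      · simp only [if_pos hc]
        have hle : tops.findIdx (fun m => decide (m < x)) ≤ (lo + hi) / 2 := by
          apply findIdx_le_of_pred hmidlen
          simp only [decide_eq_true_eq]
          rw [← List.getD_eq_getElem tops 0 hmidlen]
          exact hc
        exact ih lo ((lo + hi) / 2) (by omega) hlot hle (le_of_lt hmidlen)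
      · simp only [if_neg hc]
        have hgt : (lo + hi) / 2 < tops.findIdx (fun m => decide (m < x)) := by
          by_contra hle
          have htl : tops.findIdx (fun m => decide (m < x)) ≤ (lo + hi) / 2 :=
            Nat.le_of_not_lt hle
          have htlen : tops.findIdx (fun m => decide (m < x)) < tops.length :=
            lt_of_le_of_lt htl hmidlen
          have hpt := List.findIdx_getElem (p := fun m => decide (m < x)) (xs := tops)
            (w := htlen)
          simp only [decide_eq_true_eq] at hpt
          rw [← List.getD_eq_getElem tops 0 htlen] at hpt
          exact hc (hmono _ _ htl hmidlen hpt)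
        exact ih ((lo + hi) / 2 + 1) hi (by omega) hgt hthi hhil
    · rw [bsearchB]
      rw [dif_neg h]
      omega

theorem linStep_findIdx (x : Int) : ∀ tops : List Int,
    linStep x tops =
      (if tops.findIdx (fun m => decide (m < x)) = tops.length then tops ++ [x]
       else tops.set (tops.findIdx (fun m => decide (m < x))) x) := by
  intro tops
  induction tops with
  | nil => simp [linStep]
  | cons m ms ih =>
    simp only [linStep, List.findIdx_cons]
    by_cases hm : m < x
    · simp [hm, List.length_cons]
    · have hx : ¬ x > m := hm
      simp only [hm, decide_false, cond_false, List.length_cons, ih, if_false]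
      by_cases he : ms.findIdx (fun m => decide (m < x)) = ms.length
      · simp [he]
      · simp [he, List.set_cons_succ]

theorem stepB_eq_linStep (tops : List Int) (x : Int)
    (hs : tops.Pairwise (· ≥ ·)) : stepB tops x = linStep x tops := by
  have hmono : ∀ i j : Nat, i ≤ j → j < tops.length →
      tops.getD i 0 < x → tops.getD j 0 < x := by
    intro i j hij hj hlt
    have hi : i < tops.length := lt_of_le_of_lt hij hj
    rcases Nat.lt_or_ge i j with h | h
    · have := (List.pairwise_iff_getElem.mp hs) i j hi hj h
      rw [List.getD_eq_getElem tops 0 hj]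
      rw [List.getD_eq_getElem tops 0 hi] at hlt
      exact lt_of_le_of_lt this hlt
    · have : i = j := le_antisymm hij h
      subst this; exact hlt
  have ht := List.findIdx_le_length (p := fun m => decide (m < x)) (xs := tops)
  unfold stepB
  rw [bsearchB_eq_findIdx tops x hmono tops.length 0 tops.length (by omega) (Nat.zero_le _) ht le_rfl]
  exact (linStep_findIdx x tops).symm

theorem mem_linStep {x y : Int} {ms : List Int} (h : y ∈ linStep x ms) :
    y = x ∨ y ∈ ms := by
  induction ms with
  | nil => simp [linStep] at h; left; exact h
  | cons m t ih =>
    simp only [linStep] at h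
    split at h
    · rcases List.mem_cons.mp h with h | h
      · left; exact h
      · right; exact List.mem_cons_of_mem _ h
    · rcases List.mem_cons.mp h with h | h
      · right; simp [h]
      · rcases ih h with h | h
        · left; exact h
        · right; exact List.mem_cons_of_mem _ h

theorem linStep_pairwise (x : Int) {ms : List Int}
    (hs : ms.Pairwise (· ≥ ·)) : (linStep x ms).Pairwise (· ≥ ·) := by
  induction ms with
  | nil => simp [linStep]
  | cons m t ih =>
    rcases List.pairwise_cons.mp hs with ⟨hm, ht⟩
    simp only [linStep]
    by_cases hx : x > m
    · rw [if_pos hx]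
      exact List.pairwise_cons.mpr ⟨fun y hy => le_trans (hm y hy) (le_of_lt hx), ht⟩
    · rw [if_neg hx]
      refine List.pairwise_cons.mpr ⟨?_, ih ht⟩
      intro y hy
      rcases mem_linStep hy with h | h
      · subst h; exact Int.not_lt.mp hx
      · exact hm y h

theorem foldB_eq_foldLin (rest : List Int) :
    ∀ ms : List Int, ms.Pairwise (· ≥ ·) →
    rest.foldl stepB ms = rest.foldl (fun a x => linStep x a) ms := by
  induction rest with
  | nil => intro ms _; rfl
  | cons x t ih =>
    intro ms hs
    simp only [List.foldl_cons]
    rw [stepB_eq_linStep ms x hs, ih _ (linStep_pairwise x hs)]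

-- ===== VERDICT (by name: the statement is the Claim_ definition above) =====
theorem solution_spec : Claim_equal_solution := by
  intro stats _ hpre
  unfold Spec_solution
  cases stats with
  | nil => exact absurd rfl hpre
  | cons s0 rest =>
    unfold solution solution_alt
    simp only [List.foldl_cons]
    have hstep0 : stepB [] s0 = [s0] := by simp [stepB, bsearchB]
    rw [hstep0, foldB_eq_foldLin rest [s0] (by simp)]
    have h := foldA_maxes rest [[s0]] (by intro g hg; simp at hg; simp [hg])
    have hmap : ([[s0]].map pymaxv) = [s0] := by simp [pymaxv_cons]
    rw [hmap] at h
    have h1 : (rest.foldl (fun gs x => insertA x gs) [[s0]]).length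
        = (rest.foldl (fun ms x => linStep x ms) [s0]).length := by
      rw [← h, List.length_map]
    exact_mod_cast congrArg (fun n : Nat => (n : Int)) h1
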